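-- pv_equiv track=rewrite | github.com/faulknerpearce/advent_of_code | 2015/day_5/day_5_pt_1.py | has_no_naughty_strings
-- ===== SOURCE A (Python) =====
-- def has_no_naughty_strings(my_line):
--     naughty = ['ab', 'cd', 'pq', 'xy']
--     last_char = ''
--     for letter in my_line:
--         combined = last_char + letter
--         if combined in naughty:
--             return False
--         else:
--             last_char = letter
--     return True
-- ===== SOURCE B (Python) =====
-- def has_no_naughty_strings(my_line):
--     return not any(bad in my_line for bad in ['ab', 'cd', 'pq', 'xy'])
-- ===== Notes on version B (the rewrite author's own statement) =====
-- stated objective: idiomatic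
-- what changed: Replaces the manual character-by-character two-char-window loop with four built-in substring searches: not any(bad in my_line for bad in naughty).
import Mathlib
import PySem

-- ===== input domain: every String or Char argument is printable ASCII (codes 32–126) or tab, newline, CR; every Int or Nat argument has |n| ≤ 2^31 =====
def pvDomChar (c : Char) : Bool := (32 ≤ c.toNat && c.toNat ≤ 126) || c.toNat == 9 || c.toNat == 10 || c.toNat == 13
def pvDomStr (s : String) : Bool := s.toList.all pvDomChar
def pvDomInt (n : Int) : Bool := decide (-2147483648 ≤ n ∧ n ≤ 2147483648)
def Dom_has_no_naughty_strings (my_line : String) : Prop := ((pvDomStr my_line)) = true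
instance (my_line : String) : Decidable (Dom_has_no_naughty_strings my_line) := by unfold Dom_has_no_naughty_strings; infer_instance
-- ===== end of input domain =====

-- B replaces A's manual two-char-window loop by four built-in substring searches (more idiomatic, same cost).

-- ===== PORT A =====
-- A's loop: keep last_char, build combined = last_char + letter, return False when combined is naughty.
def pvNaughtyA : List (List Char) := [['a','b'], ['c','d'], ['p','q'], ['x','y']]

def pvLoopA : List Char → List Char → Bool
  | _, [] => true
  | last_char, letter :: rest =>
      let combined := last_char ++ [letter]
      if combined ∈ pvNaughtyA then false else pvLoopA [letter] rest

def has_no_naughty_strings (my_line : String) : Bool := pvLoopA [] my_line.toList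

-- ===== PORT B =====
def has_no_naughty_strings_alt (my_line : String) : Bool :=
  !((["ab", "cd", "pq", "xy"] : List String).any (fun bad => PySem.Str.isIn bad my_line))

-- ===== PRECONDITION & SPEC =====
def Spec_has_no_naughty_strings (my_line : String) (out : Bool) : Prop := out = has_no_naughty_strings_alt my_line
instance (my_line : String) (out : Bool) : Decidable (Spec_has_no_naughty_strings my_line out) := by unfold Spec_has_no_naughty_strings; infer_instance

-- ===== CLAIM (what is proved, stated in full; the proofs are below) =====
def Claim_equal_has_no_naughty_strings : Prop := ∀ (my_line : String), Dom_has_no_naughty_strings my_line → Spec_has_no_naughty_strings my_line (has_no_naughty_strings my_line)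

-- ===== LEMMAS AND PROOFS =====

-- B's value seen on the char-list side.
def pvAltL (l : List Char) : Bool :=
  !(pvNaughtyA.any (fun bad => PySem.Chars.isIn bad l))

theorem pvAlt_eq (s : String) : has_no_naughty_strings_alt s = pvAltL s.toList := by
  simp [has_no_naughty_strings_alt, pvAltL, pvNaughtyA, PySem.Str.isIn_eq, List.any]

-- A length-2 needle found in c :: d :: rest means it matches at the head or occurs in d :: rest.
theorem isIn_two_cons_cons (x y c d : Char) (rest : List Char) :
    PySem.Chars.isIn [x, y] (c :: d :: rest)
      = ((c == x && d == y) || PySem.Chars.isIn [x, y] (d :: rest)) := by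
  by_cases h : [x, y] <:+: (d :: rest)
  · rw [(PySem.Chars.isIn_iff_infix _ _).2 (h.trans ⟨[c], [], by simp⟩)]
    rw [(PySem.Chars.isIn_iff_infix _ _).2 h]
    simp
  · rw [(PySem.Chars.isIn_eq_false_iff _ _).2 h]
    by_cases hm : c = x ∧ d = y
    · obtain ⟨rfl, rfl⟩ := hm
      rw [(PySem.Chars.isIn_iff_infix _ _).2 ⟨[], rest, by simp⟩]
      simp
    · have : ¬ [x, y] <:+: (c :: d :: rest) := by
        intro hi
        rcases (List.infix_cons_iff).1 hi with hp | ht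
        · rcases hp with ⟨t, ht⟩
          simp at ht
          exact hm ⟨ht.1.symm, ht.2.1.symm⟩
        · exact h ht
      rw [(PySem.Chars.isIn_eq_false_iff _ _).2 this]
      simp
      intro hc hd
      exact hm ⟨hc, hd⟩

-- A length-2 needle never occurs in a list of length ≤ 1.
theorem isIn_two_short (x y : Char) (l : List Char) (h : l.length ≤ 1) :
    PySem.Chars.isIn [x, y] l = false := by
  apply (PySem.Chars.isIn_eq_false_iff _ _).2
  intro hi
  have := hi.length_le
  simp at this
  omega

-- Loop invariant: after seeing character c, A's remaining loop decides B's answer on c :: rest.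
theorem pvLoopA_eq (l : List Char) : ∀ (c : Char), pvLoopA [c] l = pvAltL (c :: l) := by
  induction l with
  | nil =>
      intro c
      simp [pvLoopA, pvAltL, pvNaughtyA, List.any,
        isIn_two_short _ _ [c] (by simp)]
  | cons d rest ih =>
      intro c
      rw [pvLoopA]
      by_cases hmem : ([c] ++ [d]) ∈ pvNaughtyA
      · simp only [hmem, if_true]
        have : pvAltL (c :: d :: rest) = false := by
          simp only [pvAltL, Bool.not_eq_false', List.any_eq_true]
          refine ⟨[c] ++ [d], hmem, ?_⟩
          exact (PySem.Chars.isIn_iff_infix _ _).2 ⟨[], rest, by simp⟩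
        rw [this]
      · simp only [hmem, if_false]
        rw [ih d]
        simp only [pvAltL, pvNaughtyA, List.any, isIn_two_cons_cons]
        simp [pvNaughtyA] at hmem
        rcases hmem with ⟨h1, h2, h3, h4⟩
        have e1 : (c == 'a' && d == 'b') = false := by
          simp; intro hc hd; exact h1 hc hd
        have e2 : (c == 'c' && d == 'd') = false := by
          simp; intro hc hd; exact h2 hc hd
        have e3 : (c == 'p' && d == 'q') = false := by
          simp; intro hc hd; exact h3 hc hd
        have e4 : (c == 'x' && d == 'y') = false := by
          simp; intro hc hd; exact h4 hc hd
        rw [e1, e2, e3, e4]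
        simp

-- ===== VERDICT (by name: the statement is the Claim_ definition above) =====
theorem has_no_naughty_strings_spec : Claim_equal_has_no_naughty_strings := by
  intro s _
  unfold Spec_has_no_naughty_strings has_no_naughty_strings
  rw [pvAlt_eq]
  cases h : s.toList with
  | nil => simp [pvLoopA, pvAltL, pvNaughtyA, List.any, isIn_two_short _ _ [] (by simp)]
  | cons c rest =>
      rw [pvLoopA]
      have : ∀ x ∈ pvNaughtyA, ([] ++ [c]) ≠ x := by
        intro x hx
        simp [pvNaughtyA] at hx
        rcases hx with rfl | rfl | rfl | rfl <;> simp
      rw [if_neg (fun hm => this _ hm rfl)]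
      exact pvLoopA_eq rest c
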